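-- pv_equiv track=rewrite | github.com/abecus/DS-and-Algorithms | problems/DynamicProgramming/prefixMatch.py | prefixMatch
-- ===== SOURCE A (Python) =====
-- def check(s1, s2):
--     if len(s1)<len(s2):
--         return False
--
--     for i in range(len(s2)):
--         if s2[i]==s1[i]:
--             continue
--
--         else:
--             return False
--
--     else:
--       return True
--
-- def prefixMatch(doc, l):
--     """
--     a bouteforce way with time complexity O(|doc|*|l|)
--
--     itype: doc:str
--
--     rtype: l: list of str to check
--     """
--     ret = []
--     doc = doc.split(' ')
--
--     for tocheck in l:
--         index = 0
--         temp = []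
--         f = 0
--         for withStr in doc:
--             if check(withStr.lower(), tocheck.lower()):
--                 temp.append(index)
--                 f = 1
--
--             index+= len(withStr)+1
--
--         if f==0:
--             temp.append(-1)
--         ret.append(temp)
--
--     return ret
-- ===== SOURCE B (Python) =====
-- def prefixMatch(doc, l):
--     """Build a dict mapping every lowercased word prefix (up to the longest
--     query length, longer ones can never be looked up) to the offsets of the
--     words starting with it, then answer each query by a single lookup."""
--     cap = max((len(p) for p in l), default=0)
--     table = {}
--     offset = 0
--     for w in doc.split(' '):
--         lw = w.lower()
--         for k in range(min(len(lw), cap) + 1):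
--             table.setdefault(lw[:k], []).append(offset)
--         offset += len(w) + 1
--     return [table.get(p.lower(), [-1]) for p in l]
-- ===== Notes on version B (the rewrite author's own statement) =====
-- stated objective: alternative
-- what changed: Instead of re-scanning every word of the document for each query prefix, B builds in one pass over the document a dict mapping every lowercased word prefix (up to the longest query length) to the list of offsets of the words starting with it, and answers each query with a single dict lookup.
import Mathlib
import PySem

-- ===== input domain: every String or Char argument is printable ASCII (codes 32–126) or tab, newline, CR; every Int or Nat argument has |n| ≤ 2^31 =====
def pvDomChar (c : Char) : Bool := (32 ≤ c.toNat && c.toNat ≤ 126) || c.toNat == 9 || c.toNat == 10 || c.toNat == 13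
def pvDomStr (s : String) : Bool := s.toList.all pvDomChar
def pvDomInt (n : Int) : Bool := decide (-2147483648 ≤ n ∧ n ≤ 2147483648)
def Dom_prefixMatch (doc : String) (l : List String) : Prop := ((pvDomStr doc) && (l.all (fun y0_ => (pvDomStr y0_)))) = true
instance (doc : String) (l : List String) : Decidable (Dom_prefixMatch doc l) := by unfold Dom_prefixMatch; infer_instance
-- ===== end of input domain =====

-- B builds once a dict from every lowercased word prefix (up to the longest query
-- length) to its offset list, and answers each query by one lookup instead of A's
-- per-query scan of all words (objective: alternative algorithm).

-- ===== PORT A =====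
-- helper `check(s1, s2)`: len guard, then the index loop with early return False
def check (s1 s2 : String) : Bool :=
  if PySem.Str.len s1 < PySem.Str.len s2 then false
  else (List.range s2.toList.length).all (fun i => s2.toList[i]? == s1.toList[i]?)

def prefixMatch (doc : String) (l : List String) : List (List Int) :=
  -- doc.split(' '): separator is nonempty, so split? is always `some`
  let docW := (PySem.Str.split? doc " ").getD []
  l.foldl (fun ret tocheck =>
    let r := docW.foldl (fun (st : Int × List Int × Int) withStr =>
      if check (PySem.Str.lower withStr) (PySem.Str.lower tocheck)
      then (st.1 + PySem.Str.len withStr + 1, st.2.1 ++ [st.1], 1)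
      else (st.1 + PySem.Str.len withStr + 1, st.2.1, st.2.2))
      ((0 : Int), ([] : List Int), (0 : Int))
    let temp := if r.2.2 = 0 then r.2.1 ++ [-1] else r.2.1
    ret ++ [temp]) []

-- ===== PORT B =====
-- inner loop: for k in range(min(len(lw), cap) + 1): table.setdefault(lw[:k], []).append(offset)
def bInsertWord (off cap : Int) (lw : String) (t : PySem.Dict String (List Int)) :
    PySem.Dict String (List Int) :=
  (PySem.List.pyRange 0 (min (PySem.Str.len lw) cap + 1) 1).foldl
    (fun t k => t.modify (PySem.Str.slice lw none (some k)) [] (fun v => v ++ [off])) t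

def bStep (cap : Int) (p : PySem.Dict String (List Int) × Int) (w : String) :
    PySem.Dict String (List Int) × Int :=
  (bInsertWord p.2 cap (PySem.Str.lower w) p.1, p.2 + PySem.Str.len w + 1)

def prefixMatch_alt (doc : String) (l : List String) : List (List Int) :=
  -- cap = max((len(p) for p in l), default=0)
  let cap := PySem.List.maxD (l.map PySem.Str.len) (fun x => x) 0
  let st := ((PySem.Str.split? doc " ").getD []).foldl (bStep cap) (PySem.Dict.empty, 0)
  l.map (fun q => (st.1.get? (PySem.Str.lower q)).getD [-1])

-- ===== PRECONDITION & SPEC =====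
def Spec_prefixMatch (doc : String) (l : List String) (out : List (List Int)) : Prop := out = prefixMatch_alt doc l
instance (doc : String) (l : List String) (out : List (List Int)) : Decidable (Spec_prefixMatch doc l out) := by unfold Spec_prefixMatch; infer_instance

-- ===== CLAIM (what is proved, stated in full; the proofs are below) =====
def Claim_equal_prefixMatch : Prop := ∀ (doc : String) (l : List String), Dom_prefixMatch doc l → Spec_prefixMatch doc l (prefixMatch doc l)

-- ===== LEMMAS AND PROOFS =====

-- offsets (starting from `off`) of the words of `ws` of which `q` is a case-ignored prefix
def pvMatches (q : String) : Int → List String → List Int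
  | _, [] => []
  | off, w :: ws =>
    (if check (PySem.Str.lower w) q then [off] else []) ++ pvMatches q (off + PySem.Str.len w + 1) ws

theorem check_iff (s1 s2 : String) : check s1 s2 = true ↔ s2.toList <+: s1.toList := by
  unfold check
  split_ifs with h
  · simp only [false_iff]
    intro hp
    have hl := hp.length_le
    simp only [PySem.Str.len] at h
    omega
  · simp only [PySem.Str.len, not_lt, Nat.cast_le] at h
    rw [List.all_eq_true, List.prefix_iff_getElem?]
    constructor
    · intro hall i hi
      have h2 : i < s1.toList.length := lt_of_lt_of_le hi h
      have := hall i (List.mem_range.mpr hi)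
      rw [beq_iff_eq] at this
      rw [List.getElem?_eq_getElem h2, List.getElem?_eq_getElem hi] at this
      rw [List.getElem?_eq_getElem h2]
      exact this.symm ▸ rfl
    · intro hp i hi
      have hi' := List.mem_range.mp hi
      have h2 : i < s1.toList.length := lt_of_lt_of_le hi' h
      have := hp i hi'
      rw [beq_iff_eq, List.getElem?_eq_getElem hi', List.getElem?_eq_getElem h2]
      rw [List.getElem?_eq_getElem h2] at this
      exact (Option.some.inj this).symm ▸ rfl

-- A's inner loop, characterised
theorem A_loop (q : String) (ws : List String) : ∀ (off : Int) (t : List Int) (f : Int),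
    ws.foldl (fun (st : Int × List Int × Int) w =>
      if check (PySem.Str.lower w) q
      then (st.1 + PySem.Str.len w + 1, st.2.1 ++ [st.1], 1)
      else (st.1 + PySem.Str.len w + 1, st.2.1, st.2.2)) (off, t, f)
    = ((ws.foldl (fun a w => a + PySem.Str.len w + 1) off),
       t ++ pvMatches q off ws,
       if pvMatches q off ws = [] then f else 1) := by
  induction ws with
  | nil => intro off t f; simp [pvMatches]
  | cons w ws ih =>
    intro off t f
    simp only [List.foldl_cons, pvMatches]
    by_cases hc : check (PySem.Str.lower w) q
    · rw [if_pos hc, ih]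
      simp [hc, List.append_assoc]
    · rw [if_neg hc, ih]
      simp [hc]

-- get? after Python's d.setdefault(k, []).append(x) (= modify k [] (· ++ [x]))
theorem get?_modify (d : PySem.Dict String (List Int)) (k q : String) (f : List Int → List Int) :
    (d.modify k [] f).get? q = if q = k then some (f (d.getD k [])) else d.get? q := by
  simp only [PySem.Dict.modify]
  rw [PySem.Dict.get?_insert]

-- B's per-word prefix insertion, characterised on the range fold
theorem sliceFold (lw : String) (off : Int) : ∀ (n : Nat), n ≤ lw.toList.length →
    ∀ (t : PySem.Dict String (List Int)) (q : String),
    ((List.range (n+1)).foldl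
      (fun t (k : Nat) => t.modify (PySem.Str.slice lw none (some (k : Int))) [] (fun v => v ++ [off])) t).get? q
    = if q.toList <+: lw.toList.take n then some (t.getD q [] ++ [off]) else t.get? q := by
  have hkey : ∀ (k : Nat), (PySem.Str.slice lw none (some (k : Int))).toList = lw.toList.take k :=
    fun k => by simp
  intro n
  induction n with
  | zero =>
    intro _ t q
    rw [show (0+1) = 1 from rfl, List.range_one]
    simp only [List.foldl_cons, List.foldl_nil]
    rw [get?_modify]
    by_cases hq : q.toList <+: lw.toList.take 0
    · have hq0 : q.toList = [] := by
        rw [List.take_zero] at hq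
        exact List.prefix_nil.mp hq
      have hq' : q = PySem.Str.slice lw none (some ((0:Nat):Int)) := by
        apply String.toList_inj.mp
        rw [hkey 0, List.take_zero, hq0]
      rw [if_pos hq, if_pos hq', ← hq']
    · have hq' : q ≠ PySem.Str.slice lw none (some ((0:Nat):Int)) := by
        intro he; apply hq; rw [he, hkey 0]
      rw [if_neg hq, if_neg hq']
  | succ n ih =>
    intro hn t q
    have hn' : n ≤ lw.toList.length := Nat.le_of_succ_le hn
    rw [List.range_succ, List.foldl_append]
    simp only [List.foldl_cons, List.foldl_nil]
    rw [get?_modify]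
    by_cases hq : q = PySem.Str.slice lw none (some ((n+1:Nat):Int))
    · have hqL : q.toList = lw.toList.take (n+1) := by rw [hq, hkey (n+1)]
      have hnot : ¬ q.toList <+: lw.toList.take n := by
        intro hp
        have hl := hp.length_le
        rw [hqL, List.length_take, List.length_take] at hl
        omega
      have hPq := ih hn' t q
      rw [if_neg hnot] at hPq
      have hPD : ((List.range (n+1)).foldl
          (fun t (k : Nat) => t.modify (PySem.Str.slice lw none (some (k : Int))) [] (fun v => v ++ [off])) t).getD q []
          = t.getD q [] := by
        rw [PySem.Dict.getD_eq_get?_getD, hPq, PySem.Dict.getD_eq_get?_getD]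
      rw [if_pos hq, ← hq, hPD, if_pos (by rw [hqL])]
    · rw [if_neg hq, ih hn' t q]
      have hiff : (q.toList <+: lw.toList.take (n+1)) ↔ (q.toList <+: lw.toList.take n) := by
        constructor
        · intro hp
          have heq := List.prefix_iff_eq_take.mp hp
          have hle : q.toList.length ≤ n+1 := by
            have hl := hp.length_le
            rw [List.length_take] at hl
            omega
          rcases Nat.lt_or_ge q.toList.length (n+1) with hlt | hge
          · rw [heq, List.take_take]
            have hmin : min q.toList.length (n+1) = q.toList.length := by omega
            rw [hmin]
            exact List.take_isPrefix_take.mpr (Or.inl (by omega))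
          · exfalso
            have hql : q.toList.length = n+1 := by omega
            apply hq
            apply String.toList_inj.mp
            rw [hkey (n+1), heq, hql, List.take_take]
            simp
        · intro hp
          exact hp.trans (List.take_isPrefix_take.mpr (Or.inl (by omega)))
      rw [if_congr hiff rfl rfl]

theorem bInsertWord_get? (off cap : Int) (lw : String) (t : PySem.Dict String (List Int))
    (q : String) (hcap : 0 ≤ cap) (hq : (q.toList.length : Int) ≤ cap) :
    (bInsertWord off cap lw t).get? q
    = if q.toList <+: lw.toList then some (t.getD q [] ++ [off]) else t.get? q := by
  unfold bInsertWord
  have h1 : min (PySem.Str.len lw) cap + 1 = ((min lw.toList.length cap.toNat + 1 : Nat) : Int) := by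
    show min ((lw.toList.length : Nat) : Int) cap + 1 = _
    push_cast
    rw [Int.toNat_of_nonneg hcap]
  rw [h1, PySem.List.pyRange_zero, Int.toNat_natCast, List.foldl_map]
  rw [sliceFold lw off (min lw.toList.length cap.toNat) (min_le_left _ _) t q]
  have hiff : (q.toList <+: lw.toList.take (min lw.toList.length cap.toNat)) ↔ (q.toList <+: lw.toList) := by
    constructor
    · intro hp
      exact hp.trans (List.take_prefix _ _)
    · intro hp
      have heq := List.prefix_iff_eq_take.mp hp
      have h2 : q.toList.length ≤ lw.toList.length := hp.length_le
      have h3 : q.toList.length ≤ cap.toNat := by omega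
      rw [heq]
      exact List.take_isPrefix_take.mpr (Or.inl (by omega))
  rw [if_congr hiff rfl rfl]

theorem B_loop (q : String) (cap : Int) (hcap : 0 ≤ cap) (hq : (q.toList.length : Int) ≤ cap)
    (ws : List String) : ∀ (t : PySem.Dict String (List Int)) (off : Int),
    ((ws.foldl (bStep cap) (t, off)).1).get? q
    = if pvMatches q off ws = [] then t.get? q
      else some (t.getD q [] ++ pvMatches q off ws) := by
  induction ws with
  | nil => intro t off; simp [pvMatches]
  | cons w ws ih =>
    intro t off
    simp only [List.foldl_cons, pvMatches, bStep]
    have hg := bInsertWord_get? off cap (PySem.Str.lower w) t q hcap hq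
    by_cases hc : check (PySem.Str.lower w) q
    · rw [if_pos ((check_iff _ _).mp hc)] at hg
      have hgD : (bInsertWord off cap (PySem.Str.lower w) t).getD q [] = t.getD q [] ++ [off] := by
        rw [PySem.Dict.getD_eq_get?_getD, hg]; rfl
      rw [if_pos hc, ih]
      by_cases h0 : pvMatches q (off + PySem.Str.len w + 1) ws = []
      · rw [if_pos h0, h0, hg, if_neg (by simp)]
        simp
      · rw [if_neg h0, hgD, if_neg (by simp), List.append_assoc]
    · rw [if_neg (fun hp => hc ((check_iff _ _).mpr hp))] at hg
      have hgD : (bInsertWord off cap (PySem.Str.lower w) t).getD q [] = t.getD q [] := by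
        rw [PySem.Dict.getD_eq_get?_getD, hg, PySem.Dict.getD_eq_get?_getD]
      rw [if_neg hc, ih, hg, hgD]
      simp

-- the computed cap bounds every query length and is nonnegative
theorem cap_spec (l : List String) :
    0 ≤ PySem.List.maxD (l.map PySem.Str.len) (fun x => x) 0 ∧
    ∀ q ∈ l, (q.toList.length : Int) ≤ PySem.List.maxD (l.map PySem.Str.len) (fun x => x) 0 := by
  unfold PySem.List.maxD
  cases hmax : PySem.List.max? (l.map PySem.Str.len) (fun x => x) with
  | none =>
    have hl : l = [] := List.map_eq_nil_iff.mp ((PySem.List.max?_eq_none_iff _ _).mp hmax)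
    subst hl
    simp
  | some m =>
    have hmem := PySem.List.max?_mem hmax
    have hmx := PySem.List.max?_isMax hmax
    obtain ⟨p, _, hp⟩ := List.mem_map.mp hmem
    constructor
    · rw [Option.getD_some, ← hp]
      exact Int.natCast_nonneg _
    · intro q hq
      have := hmx (PySem.Str.len q) (List.mem_map_of_mem hq)
      simpa using this

-- ===== VERDICT (by name: the statement is the Claim_ definition above) =====
theorem prefixMatch_spec : Claim_equal_prefixMatch := by
  intro doc l _
  unfold Spec_prefixMatch prefixMatch prefixMatch_alt
  simp only []
  rw [PySem.List.foldl_append_singleton_eq_map]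
  simp only [List.nil_append]
  apply List.map_congr_left
  intro q hq
  obtain ⟨hcap, hbound⟩ := cap_spec l
  have hlen : ((PySem.Str.lower q).toList.length : Int) ≤
      PySem.List.maxD (l.map PySem.Str.len) (fun x => x) 0 := by
    have he : (PySem.Str.lower q).toList.length = q.toList.length := by
      simp [PySem.Chars.lower]
    rw [he]
    exact hbound q hq
  rw [A_loop (PySem.Str.lower q), B_loop (PySem.Str.lower q) _ hcap hlen]
  by_cases hM : pvMatches (PySem.Str.lower q) 0 ((PySem.Str.split? doc " ").getD []) = []
  · simp [hM]
  · simp [hM, PySem.Dict.getD_empty]
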